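-- pv_equiv track=rewrite | github.com/benkim077/TIL | coding_test/swea/0826/영준이의_카드_카운팅.py | solve
-- ===== SOURCE A (Python) =====
-- def solve(lst):
--     N = len(lst)
--
--     # 입력값 확인
--     if len(lst[-1]) != 3:
--         return 'ERROR'
--
--     # 중복 카드가 있는 경우 => 에러
--     for i in range(N - 1):
--         for j in range(i + 1, N):
--             if lst[i] == lst[j]:
--                 return 'ERROR'
--
--     # 모자란 카드 숫자
--     cnt = {'S': 13, # 스페이드
--            'D': 13, # 다이아몬드
--            'H': 13, # 하트
--            'C': 13} # 클로버
--
--     # 모자란 카드 수가 음수가 되면 => 에러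
--     for k in range(N):
--         cnt[lst[k][0]] -= 1
--         if cnt[lst[k][0]] < 0:
--             return 'ERROR'
--
--     # 정상일 경우의 출력
--     return ' '.join(map(str, [cnt['S'], cnt['D'], cnt['H'], cnt['C']]))
-- ===== SOURCE B (Python) =====
-- def solve(lst):
--     if len(lst[-1]) != 3:
--         return 'ERROR'
--     s = sorted(lst)
--     if any(a == b for a, b in zip(s, s[1:])):
--         return 'ERROR'
--     cnt = {'S': 13, 'D': 13, 'H': 13, 'C': 13}
--     for card in lst:
--         cnt[card[0]] -= 1
--         if cnt[card[0]] < 0: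
--             return 'ERROR'
--     return ' '.join(str(cnt[c]) for c in 'SDHC')
-- ===== Notes on version B (the rewrite author's own statement) =====
-- stated objective: alternative
-- what changed: Duplicate detection is done by sorting a copy of the list and comparing adjacent elements in one pass instead of A's nested index-pair scan; guards and per-suit count-down are unchanged in behaviour.
import Mathlib
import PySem

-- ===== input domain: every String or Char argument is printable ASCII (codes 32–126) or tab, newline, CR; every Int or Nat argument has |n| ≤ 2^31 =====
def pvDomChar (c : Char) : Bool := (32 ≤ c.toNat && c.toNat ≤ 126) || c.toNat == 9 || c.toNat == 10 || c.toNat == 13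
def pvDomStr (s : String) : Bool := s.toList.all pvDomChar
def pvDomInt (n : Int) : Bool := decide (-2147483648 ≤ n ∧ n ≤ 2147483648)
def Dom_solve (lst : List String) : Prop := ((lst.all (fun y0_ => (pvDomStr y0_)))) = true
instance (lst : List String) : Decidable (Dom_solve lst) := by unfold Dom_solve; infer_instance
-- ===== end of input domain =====

-- B detects duplicates by sorting a copy and comparing adjacent elements instead of A's nested index-pair scan (neither version mutates lst).

-- ===== PORT A =====
-- 'for i in range(N-1): for j in range(i+1, N): if lst[i] == lst[j]: return ERROR' (early return = any)
def solveDupScan (lst : List String) (N : Int) : Bool :=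
  (PySem.List.pyRange 0 (N - 1) 1).any fun i =>
    (PySem.List.pyRange (i + 1) N 1).any fun j =>
      PySem.List.pyGet? lst i == PySem.List.pyGet? lst j

-- 'for k in range(N): cnt[lst[k][0]] -= 1; if cnt[lst[k][0]] < 0: return ERROR' then the final join;
-- none = the loop raises (IndexError on lst[k][0] / KeyError on cnt[...]), excluded by Pre_
def solveCountLoop (lst : List String) : PySem.Dict Char Int → List Int → Option String
  | cnt, [] => some (PySem.Str.join " "
      [PySem.Int.toStr (cnt.getD 'S' 0), PySem.Int.toStr (cnt.getD 'D' 0),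
       PySem.Int.toStr (cnt.getD 'H' 0), PySem.Int.toStr (cnt.getD 'C' 0)])
  | cnt, k :: ks =>
    match PySem.List.pyGet? lst k with
    | none => none
    | some card =>
      match PySem.Str.pyGet? card 0 with
      | none => none
      | some ch =>
        match cnt.get? ch with
        | none => none
        | some v =>
          let cnt' := cnt.insert ch (v - 1)
          if v - 1 < 0 then some "ERROR" else solveCountLoop lst cnt' ks

def solve (lst : List String) : String :=
  let N : Int := lst.length
  match PySem.List.pyGet? lst (-1) with
  | none => ""          -- lst[-1] raises IndexError: excluded by Pre_
  | some lastCard =>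
    if PySem.Str.len lastCard ≠ 3 then "ERROR"
    else if solveDupScan lst N then "ERROR"
    else (solveCountLoop lst (PySem.Dict.ofList [('S', 13), ('D', 13), ('H', 13), ('C', 13)])
            (PySem.List.pyRange 0 N 1)).getD ""

-- ===== PORT B =====
-- 'for card in lst: cnt[card[0]] -= 1; if cnt[card[0]] < 0: return ERROR' then ' '.join(str(cnt[c]) for c in 'SDHC')
def solveAltCount : PySem.Dict Char Int → List String → Option String
  | cnt, [] => some (PySem.Str.join " " (['S', 'D', 'H', 'C'].map fun c => PySem.Int.toStr (cnt.getD c 0)))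
  | cnt, card :: rest =>
    match PySem.Str.pyGet? card 0 with
    | none => none
    | some ch =>
      match cnt.get? ch with
      | none => none
      | some v =>
        let cnt' := cnt.insert ch (v - 1)
        if v - 1 < 0 then some "ERROR" else solveAltCount cnt' rest

def solve_alt (lst : List String) : String :=
  match PySem.List.pyGet? lst (-1) with
  | none => ""          -- lst[-1] raises IndexError: excluded by Pre_
  | some lastCard =>
    if PySem.Str.len lastCard ≠ 3 then "ERROR"
    else
      let s := PySem.List.sorted lst (fun x => x) false
      if (s.zip (s.drop 1)).any (fun p => p.1 == p.2) then "ERROR"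
      else (solveAltCount (PySem.Dict.ofList [('S', 13), ('D', 13), ('H', 13), ('C', 13)]) lst).getD ""

-- ===== PRECONDITION & SPEC =====
-- a card the counting loop handles without raising: nonempty, first char a suit letter
def goodCard (s : String) : Bool :=
  s.toList[0]? ∈ ([some 'S', some 'D', some 'H', some 'C'] : List (Option Char))

-- Pre_ excludes the empty list (lst[-1] raises IndexError) and duplicate-free lists reaching the counting loop
-- that contain a card that is empty or starts with a non-suit character, on which A raises IndexError/KeyError —
-- unless some suit is over-represented (≥ 14 cards) before the first such bad card, where A returns 'ERROR' first.
def Pre_solve (lst : List String) : Prop :=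
  lst ≠ [] ∧
    ((∀ t ∈ lst.getLast?, PySem.Str.len t ≠ 3) ∨
     ¬ lst.Nodup ∨
     (∀ s ∈ lst, goodCard s = true) ∨
     (∃ c ∈ (['S', 'D', 'H', 'C'] : List Char),
        14 ≤ (lst.takeWhile goodCard).countP (fun s => s.toList[0]? == some c)))
instance (lst : List String) : Decidable (Pre_solve lst) := by unfold Pre_solve; infer_instance

def pvWitness_solve : List String := ["SA1", "D02", "H03"]

def Spec_solve (lst : List String) (out : String) : Prop := out = solve_alt lst
instance (lst : List String) (out : String) : Decidable (Spec_solve lst out) := by unfold Spec_solve; infer_instance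

-- ===== CLAIM (what is proved, stated in full; the proofs are below) =====
def Claim_equal_solve : Prop := ∀ (lst : List String), Dom_solve lst → Pre_solve lst → Spec_solve lst (solve lst)

-- ===== LEMMAS AND PROOFS =====

-- on any list whose getElem is monotone, some adjacent pair is equal iff the list is not Nodup
lemma adj_aux (s : List String)
    (hmono : ∀ p q : Nat, ∀ hpq : p ≤ q, ∀ hq : q < s.length, s[p]'(Nat.lt_of_le_of_lt hpq hq) ≤ s[q]) :
    ((s.zip (s.drop 1)).any (fun p => p.1 == p.2) = true) ↔ ¬ s.Nodup := by
  simp only [List.any_eq_true, beq_iff_eq]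
  constructor
  · rintro ⟨⟨a, b⟩, hm, he⟩
    obtain ⟨i, hi, hget⟩ := List.getElem_of_mem hm
    have hlen : i + 1 < s.length := by
      simp only [List.length_zip, List.length_drop] at hi; omega
    simp only [List.getElem_zip, List.getElem_drop, Nat.add_comm 1 i] at hget
    obtain ⟨ha, hb⟩ := Prod.mk.injEq .. ▸ hget
    rw [List.nodup_iff_getElem?_ne_getElem?]
    push_neg
    refine ⟨i, i + 1, by omega, hlen, ?_⟩
    rw [List.getElem?_eq_getElem (by omega), List.getElem?_eq_getElem hlen]
    simp only [Option.some.injEq]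
    rw [ha, hb]; exact he
  · intro h
    rw [List.nodup_iff_getElem?_ne_getElem?] at h
    push_neg at h
    obtain ⟨i, j, hij, hj, he⟩ := h
    rw [List.getElem?_eq_getElem (by omega), List.getElem?_eq_getElem hj] at he
    have hvij : s[i]'(by omega) = s[j] := by simpa using he
    have h1 : s[i]'(by omega) ≤ s[i+1]'(by omega) := hmono i (i+1) (by omega) (by omega)
    have h2 : s[i+1]'(by omega) ≤ s[j] := hmono (i+1) j (by omega) hj
    have heq : s[i]'(by omega) = s[i+1]'(by omega) := le_antisymm h1 (hvij ▸ h2)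
    have hm : (s.zip (s.drop 1))[i]'(by simp only [List.length_zip, List.length_drop]; omega)
        ∈ s.zip (s.drop 1) := List.getElem_mem _
    simp only [List.getElem_zip, List.getElem_drop, Nat.add_comm 1 i] at hm
    exact ⟨_, hm, heq⟩

-- B's adjacent comparison on the sorted copy finds a duplicate iff lst is not Nodup
lemma adj_iff (lst : List String) :
    ((PySem.List.sorted lst (fun x => x) false).zip
      ((PySem.List.sorted lst (fun x => x) false).drop 1)).any (fun p => p.1 == p.2) = true
    ↔ ¬ lst.Nodup := by
  rw [← (PySem.List.sorted_perm lst (fun x => x) false).nodup_iff]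
  exact adj_aux _ (fun p q hpq hq => PySem.List.sorted_id_getElem_mono lst hpq hq)

-- A's nested index scan finds a duplicate iff lst is not Nodup
lemma dupScan_iff (lst : List String) :
    solveDupScan lst lst.length = true ↔ ¬ lst.Nodup := by
  unfold solveDupScan
  rw [List.nodup_iff_getElem?_ne_getElem?]
  simp only [List.any_eq_true, PySem.List.mem_pyRange_one, beq_iff_eq]
  constructor
  · rintro ⟨i, ⟨hi0, hi1⟩, j, ⟨hj0, hj1⟩, hij⟩
    push_neg
    obtain ⟨n, rfl⟩ := Int.eq_ofNat_of_zero_le hi0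
    obtain ⟨m, rfl⟩ := Int.eq_ofNat_of_zero_le (by omega : (0:Int) ≤ j)
    refine ⟨n, m, by omega, by omega, ?_⟩
    rw [← PySem.List.pyGet?_natCast, ← PySem.List.pyGet?_natCast, hij]
  · intro h
    push_neg at h
    obtain ⟨i, j, hij, hj, he⟩ := h
    refine ⟨(i : Int), ⟨by omega, by omega⟩, (j : Int), ⟨by omega, by omega⟩, ?_⟩
    rw [PySem.List.pyGet?_natCast, PySem.List.pyGet?_natCast, he]

-- A's index-driven counting loop computes the same as B's element-driven one
lemma count_eq (lst : List String) :
    ∀ (suf pre : List String), lst = pre ++ suf → ∀ cnt,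
      solveCountLoop lst cnt (PySem.List.pyRange (pre.length : Int) (lst.length : Int) 1)
        = solveAltCount cnt suf := by
  intro suf
  induction suf with
  | nil =>
    intro pre hpre cnt
    subst hpre
    rw [PySem.List.pyRange_one_eq_nil (by simp)]
    simp [solveCountLoop, solveAltCount, List.map]
  | cons card rest ih =>
    intro pre hpre cnt
    have hlt : (pre.length : Int) < lst.length := by
      subst hpre; simp
    rw [PySem.List.pyRange_one_cons hlt]
    have hget : PySem.List.pyGet? lst (pre.length : Int) = some card := by
      subst hpre; exact PySem.List.pyGet?_append_length pre rest card
    simp only [solveCountLoop, solveAltCount, hget]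
    cases hc : PySem.Str.pyGet? card 0 with
    | none => simp
    | some ch =>
      simp only []
      cases hv : cnt.get? ch with
      | none => simp
      | some v =>
        simp only []
        by_cases h1 : v - 1 < 0
        · simp [h1]
        · simp only [h1, if_false]
          rw [show ((pre.length : Int) + 1) = (((pre ++ [card]).length : Nat) : Int) by simp,
              ih (pre ++ [card]) (by simp [hpre])]

-- ===== VERDICT (by name: the statement is the Claim_ definition above) =====
theorem solve_spec : Claim_equal_solve := by
  intro lst _ _
  unfold Spec_solve solve solve_alt
  cases h : PySem.List.pyGet? lst (-1) with
  | none => rfl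
  | some lastCard =>
    dsimp only []
    by_cases h3 : PySem.Str.len lastCard ≠ 3
    · rw [if_pos h3, if_pos h3]
    · rw [if_neg h3, if_neg h3]
      by_cases hd : lst.Nodup
      · have hA : solveDupScan lst lst.length = false := by
          rw [← Bool.not_eq_true, dupScan_iff]; exact not_not_intro hd
        have hB : ((PySem.List.sorted lst (fun x => x) false).zip
            ((PySem.List.sorted lst (fun x => x) false).drop 1)).any (fun p => p.1 == p.2) = false := by
          rw [← Bool.not_eq_true, adj_iff]; exact not_not_intro hd
        have hc := count_eq lst lst [] (by simp)
          (PySem.Dict.ofList [('S', 13), ('D', 13), ('H', 13), ('C', 13)])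
        simp only [List.length_nil, Nat.cast_zero] at hc
        rw [if_neg (by rw [hA]; exact Bool.false_ne_true),
            if_neg (by rw [hB]; exact Bool.false_ne_true), hc]
      · have hA : solveDupScan lst lst.length = true := (dupScan_iff lst).mpr hd
        have hB := (adj_iff lst).mpr hd
        rw [if_pos hA, if_pos hB]
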